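-- pv_equiv track=rewrite | github.com/trnlht/py_ex | strings/cci_1_1_has_repetitive_chars.py | has_repetitive_chars_set
-- ===== SOURCE A (Python) =====
-- def has_repetitive_chars_set(s: str):
--     """
--     Аналог предыдущей функции, но с множеством в качестве таблицы. В множестве хранятся сами символы.
--     При появлении в множестве повторного символа поиск прекращается.
--     Временная сложность: O(N)
--     [CCI 1.1]
--
--     :param s: Строка для проверки
--     :return: True если есть повторяющиеся символы, иначе - False.
--     """
--     char_counters = set()
--
--     for ch in s:
--         if ch not in char_counters:
--             char_counters.add(ch)
--         else:
--             return True
--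
--     return False
-- ===== SOURCE B (Python) =====
-- def has_repetitive_chars_set(s: str):
--     return len(set(s)) != len(s)
-- ===== Notes on version B (the rewrite author's own statement) =====
-- stated objective: idiomatic
-- what changed: Replaces the explicit early-exit loop with a closed-form cardinality comparison: build set(s) once and return len(set(s)) != len(s).
import Mathlib
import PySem

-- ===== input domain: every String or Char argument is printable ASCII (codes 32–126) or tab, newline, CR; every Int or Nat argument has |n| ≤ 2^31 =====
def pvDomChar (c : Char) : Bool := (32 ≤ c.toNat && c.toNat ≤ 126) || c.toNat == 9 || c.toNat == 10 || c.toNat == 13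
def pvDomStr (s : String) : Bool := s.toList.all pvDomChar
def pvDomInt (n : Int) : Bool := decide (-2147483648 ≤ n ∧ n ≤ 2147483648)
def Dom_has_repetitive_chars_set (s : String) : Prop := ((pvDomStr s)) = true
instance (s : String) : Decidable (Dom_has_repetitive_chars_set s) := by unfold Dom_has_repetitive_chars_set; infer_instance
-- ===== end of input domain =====

-- B replaces A's early-exit membership loop by a single cardinality comparison len(set(s)) != len(s).

-- ===== PORT A =====
-- the 'for ch in s' loop with early 'return True'
def hrcLoopA : List Char → PySem.Set Char → Bool
  | [], _ => false
  | ch :: rest, char_counters =>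
      if ¬ PySem.Set.contains char_counters ch then
        hrcLoopA rest (PySem.Set.add char_counters ch)
      else
        true

def has_repetitive_chars_set (s : String) : Bool :=
  hrcLoopA s.toList PySem.Set.empty

-- ===== PORT B =====
def has_repetitive_chars_set_alt (s : String) : Bool :=
  decide (PySem.Set.len (PySem.Set.ofList s.toList) ≠ PySem.Str.len s)

-- ===== PRECONDITION & SPEC =====
def Spec_has_repetitive_chars_set (s : String) (out : Bool) : Prop := out = has_repetitive_chars_set_alt s
instance (s : String) (out : Bool) : Decidable (Spec_has_repetitive_chars_set s out) := by unfold Spec_has_repetitive_chars_set; infer_instance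

-- ===== CLAIM (what is proved, stated in full; the proofs are below) =====
def Claim_equal_has_repetitive_chars_set : Prop := ∀ (s : String), Dom_has_repetitive_chars_set s → Spec_has_repetitive_chars_set s (has_repetitive_chars_set s)

-- ===== LEMMAS AND PROOFS =====

theorem hrc_update_len_le (l : List Char) (seen : PySem.Set Char) :
    (PySem.Set.update seen l).length ≤ seen.length + l.length := by
  induction l generalizing seen with
  | nil => simp [PySem.Set.update]
  | cons c cs ih =>
      have h := ih (PySem.Set.add seen c)
      have hadd : (PySem.Set.add seen c).length ≤ seen.length + 1 := by
        unfold PySem.Set.add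
        split <;> simp
      calc (PySem.Set.update seen (c :: cs)).length
          = (PySem.Set.update (PySem.Set.add seen c) cs).length := by
            simp [PySem.Set.update, List.foldl]
        _ ≤ (PySem.Set.add seen c).length + cs.length := ih _
        _ ≤ seen.length + (c :: cs).length := by simp; omega

theorem hrc_loop_eq (l : List Char) (seen : PySem.Set Char) :
    hrcLoopA l seen = decide ((PySem.Set.update seen l).length ≠ seen.length + l.length) := by
  induction l generalizing seen with
  | nil => simp [hrcLoopA, PySem.Set.update]
  | cons c cs ih =>
      by_cases h : PySem.Set.contains seen c
      · have hmem : c ∈ seen := by simpa [PySem.Set.contains] using h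
        have hadd : PySem.Set.add seen c = seen := by
          unfold PySem.Set.add; simp [PySem.Set.contains, hmem]
        have hle := hrc_update_len_le cs seen
        simp only [hrcLoopA, h, not_true_eq_false, if_false]
        have hupd : PySem.Set.update seen (c :: cs) = PySem.Set.update seen cs := by
          simp [PySem.Set.update, List.foldl, hadd]
        rw [hupd]
        symm
        simp only [decide_eq_true_eq, List.length_cons]
        omega
      · have hmem : c ∉ seen := by simpa [PySem.Set.contains] using h
        have hadd : (PySem.Set.add seen c).length = seen.length + 1 := by
          unfold PySem.Set.add; simp [PySem.Set.contains, hmem]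
        simp only [hrcLoopA, h, ih]
        have h1 : PySem.Set.update seen (c :: cs) = PySem.Set.update (PySem.Set.add seen c) cs := by
          simp [PySem.Set.update, List.foldl]
        rw [if_pos (by simp), h1, hadd, decide_eq_decide]
        simp only [List.length_cons]
        omega

-- ===== VERDICT (by name: the statement is the Claim_ definition above) =====
theorem has_repetitive_chars_set_spec : Claim_equal_has_repetitive_chars_set := by
  intro s _
  show has_repetitive_chars_set s = has_repetitive_chars_set_alt s
  unfold has_repetitive_chars_set has_repetitive_chars_set_alt
  rw [hrc_loop_eq]
  have hof : PySem.Set.ofList s.toList = PySem.Set.update PySem.Set.empty s.toList := rfl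
  have hlen : PySem.Str.len s = (s.toList.length : Int) := by
    simp [PySem.Str.len]
  rw [hof, hlen, PySem.Set.len]
  by_cases h : (PySem.Set.update PySem.Set.empty s.toList).length = s.toList.length
  · simp [PySem.Set.empty]
  · have : ((PySem.Set.update PySem.Set.empty s.toList).length : Int) ≠ (s.toList.length : Int) := by
      exact_mod_cast h
    simp [PySem.Set.empty]
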